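-- pv_equiv track=rewrite | github.com/moonshine-ai/moonshine-g2p2 | scripts/ctb9_electra_onnx_pure.py | _pos_prefix_token_spans
-- ===== SOURCE A (Python) =====
-- def _pos_prefix_token_spans(prefix_mask: list[bool]) -> list[list[int]]:
--     """HanLP ``TransformerSequenceTokenizer`` token_span from prefix_mask (word-list path)."""
--     cls_is_bos = False
--     sep_is_eos = False
--     if prefix_mask:
--         if cls_is_bos:
--             prefix_mask = list(prefix_mask)
--             prefix_mask[0] = True
--         if sep_is_eos:
--             prefix_mask = list(prefix_mask)
--             prefix_mask[-1] = True
--     inner = prefix_mask[1:-1]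
--     token_span: list[list[int]] = []
--     offset = 1
--     span: list[int] = []
--     for mask in inner:
--         if mask and span:
--             token_span.append(span)
--             span = []
--         span.append(offset)
--         offset += 1
--     if span:
--         token_span.append(span)
--     return token_span
-- ===== SOURCE B (Python) =====
-- def _pos_prefix_token_spans(prefix_mask: list[bool]) -> list[list[int]]:
--     """Boundary-index formulation: collect span-start boundaries, then emit ranges."""
--     inner = prefix_mask[1:-1]
--     if not inner:
--         return []
--     starts = [0] + [i for i, m in enumerate(inner) if m and i > 0]
--     bounds = starts + [len(inner)]
--     return [list(range(s + 1, e + 1)) for s, e in zip(bounds, bounds[1:])]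
-- ===== Notes on version B (the rewrite author's own statement) =====
-- stated objective: alternative
-- what changed: Replaces A's single accumulate-and-flush loop (mutable current span, flushed on each True mask and once after the loop) by a two-phase boundary decomposition: first collect the span-start boundary indices of inner (index 0 plus every later True position), then emit one range(s+1, e+1) per consecutive boundary pair; the dead cls_is_bos/sep_is_eos branches are dropped.
import Mathlib
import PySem

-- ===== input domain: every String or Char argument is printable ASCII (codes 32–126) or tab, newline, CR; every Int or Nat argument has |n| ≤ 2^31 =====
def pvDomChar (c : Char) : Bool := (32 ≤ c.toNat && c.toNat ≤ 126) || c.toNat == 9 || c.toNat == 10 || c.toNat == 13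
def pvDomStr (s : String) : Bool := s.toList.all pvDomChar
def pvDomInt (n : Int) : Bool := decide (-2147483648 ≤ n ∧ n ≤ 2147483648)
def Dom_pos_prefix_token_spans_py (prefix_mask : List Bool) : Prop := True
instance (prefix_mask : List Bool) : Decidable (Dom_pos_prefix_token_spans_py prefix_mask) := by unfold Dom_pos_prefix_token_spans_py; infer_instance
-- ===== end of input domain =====

-- B replaces A's single accumulate-and-flush loop by a boundary-index decomposition
-- (collect span-start boundaries, then emit one range per consecutive boundary pair); objective: alternative.

-- ===== PORT A =====
-- literal transliteration of A: the dead cls_is_bos/sep_is_eos branches touch nothing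
-- (both constants are False), so the first statement with an effect is inner = prefix_mask[1:-1].
def pos_prefix_token_spans_py (prefix_mask : List Bool) : List (List Int) :=
  let inner := PySem.List.slice prefix_mask (some 1) (some (-1))
  let st := inner.foldl
    (fun (st : List (List Int) × Int × List Int) mask =>
      let ts := st.1
      let off := st.2.1
      let span := st.2.2
      let p := if mask && !span.isEmpty then (ts ++ [span], ([] : List Int)) else (ts, span)
      (p.1, off + 1, p.2 ++ [off]))
    ([], 1, [])
  if st.2.2.isEmpty then st.1 else st.1 ++ [st.2.2]

-- ===== PORT B =====
def pos_prefix_token_spans_py_alt (prefix_mask : List Bool) : List (List Int) :=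
  let inner := PySem.List.slice prefix_mask (some 1) (some (-1))
  if inner.isEmpty then []
  else
    let starts : List Int :=
      0 :: (PySem.List.enumerate inner).filterMap
        (fun p => if p.2 && decide (0 < p.1) then some p.1 else none)
    let bounds := starts ++ [(inner.length : Int)]
    (bounds.zip bounds.tail).map (fun p => PySem.List.pyRange (p.1 + 1) (p.2 + 1) 1)

-- ===== PRECONDITION & SPEC =====
def Spec_pos_prefix_token_spans_py (prefix_mask : List Bool) (out : List (List Int)) : Prop := out = pos_prefix_token_spans_py_alt prefix_mask
instance (prefix_mask : List Bool) (out : List (List Int)) : Decidable (Spec_pos_prefix_token_spans_py prefix_mask out) := by unfold Spec_pos_prefix_token_spans_py; infer_instance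

-- ===== CLAIM (what is proved, stated in full; the proofs are below) =====
def Claim_equal_pos_prefix_token_spans_py : Prop := ∀ (prefix_mask : List Bool), Dom_pos_prefix_token_spans_py prefix_mask → Spec_pos_prefix_token_spans_py prefix_mask (pos_prefix_token_spans_py prefix_mask)

-- ===== LEMMAS AND PROOFS =====

-- A's loop body, named (proof helper; definitionally equal to the lambda in the port).
def stepA (st : List (List Int) × Int × List Int) (mask : Bool) : List (List Int) × Int × List Int :=
  let ts := st.1
  let off := st.2.1
  let span := st.2.2
  let p := if mask && !span.isEmpty then (ts ++ [span], ([] : List Int)) else (ts, span)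
  (p.1, off + 1, p.2 ++ [off])

-- A's loop with the trailing flush, written recursively (proof helper).
def gSpec : List Bool → Int → List Int → List (List Int)
  | [], _, span => if span.isEmpty then [] else [span]
  | m :: rest, off, span =>
      if m && !span.isEmpty then span :: gSpec rest (off + 1) [off]
      else gSpec rest (off + 1) (span ++ [off])

-- B's boundary indices, written recursively (proof helper).
def idxsFrom (k : Int) : List Bool → List Int
  | [] => []
  | m :: rest => if m && decide (0 < k) then k :: idxsFrom (k + 1) rest else idxsFrom (k + 1) rest

-- B's range build over consecutive boundary pairs (proof helper).
def build : Int → List Int → Int → List (List Int)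
  | s, [], n => [PySem.List.pyRange (s + 1) (n + 1) 1]
  | s, i :: is, n => PySem.List.pyRange (s + 1) (i + 1) 1 :: build i is n

theorem aLoop_eq (inner : List Bool) :
    ∀ (ts : List (List Int)) (off : Int) (span : List Int),
    (let st := inner.foldl stepA (ts, off, span)
     if st.2.2.isEmpty then st.1 else st.1 ++ [st.2.2]) = ts ++ gSpec inner off span := by
  induction inner with
  | nil =>
      intro ts off span
      simp only [List.foldl_nil, gSpec]
      cases h : span.isEmpty <;> simp
  | cons m rest ih =>
      intro ts off span
      rw [List.foldl_cons]
      cases hc : m && !span.isEmpty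
      · have hs : stepA (ts, off, span) m = (ts, off + 1, span ++ [off]) := by
          simp [stepA, hc]
        rw [hs, ih]
        simp only [gSpec, hc, Bool.false_eq_true, if_false]
      · have hs : stepA (ts, off, span) m = (ts ++ [span], off + 1, [off]) := by
          simp [stepA, hc]
        rw [hs, ih]
        simp [gSpec, hc, List.append_assoc]

theorem enum_eq (inner : List Bool) : ∀ (k : Int),
    (PySem.List.enumerate inner k).filterMap
      (fun p => if p.2 && decide (0 < p.1) then some p.1 else none) = idxsFrom k inner := by
  induction inner with
  | nil => intro k; simp [PySem.List.enumerate_nil, idxsFrom]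
  | cons m rest ih =>
      intro k
      rw [PySem.List.enumerate_cons]
      simp only [List.filterMap_cons, idxsFrom]
      cases hc : m && decide (0 < k)
      · exact ih (k + 1)
      · exact congrArg (List.cons k) (ih (k + 1))

theorem zip_eq (idxs : List Int) : ∀ (s n : Int),
    ((s :: (idxs ++ [n])).zip (idxs ++ [n])).map
      (fun p => PySem.List.pyRange (p.1 + 1) (p.2 + 1) 1) = build s idxs n := by
  induction idxs with
  | nil => intro s n; simp [build]
  | cons i is ih => intro s n; simp only [List.cons_append, List.zip_cons_cons, List.map_cons, build]
                    exact congrArg _ (ih i n)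

theorem span_ne_nil {s k : Int} (h : s < k) : (PySem.List.pyRange (s + 1) (k + 1) 1).isEmpty = false := by
  rw [PySem.List.pyRange_one_cons (by omega)]
  rfl

theorem main_lemma (rest : List Bool) : ∀ (k s : Int), 0 ≤ s → s < k →
    gSpec rest (k + 1) (PySem.List.pyRange (s + 1) (k + 1) 1)
      = build s (idxsFrom k rest) (k + rest.length) := by
  induction rest with
  | nil =>
      intro k s _ hsk
      simp [gSpec, build, idxsFrom, span_ne_nil hsk]
  | cons m rest ih =>
      intro k s hs hsk
      simp only [gSpec, idxsFrom, span_ne_nil hsk, Bool.not_false, Bool.and_true]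
      have hk : (0 < k) := by omega
      cases m
      · simp only [Bool.false_and, Bool.false_eq_true, if_false]
        rw [← PySem.List.pyRange_one_succ_right (by omega), ih (k + 1) s hs (by omega)]
        congr 1
        simp only [List.length_cons]
        push_cast
        omega
      · simp only [decide_eq_true hk, Bool.true_and, if_true, build]
        congr 1
        have h1 : [(k:Int) + 1] = PySem.List.pyRange (k + 1) (k + 1 + 1) 1 := by
          rw [PySem.List.pyRange_one_singleton]
        rw [h1, ih (k + 1) k (by omega) (by omega)]
        congr 1
        simp only [List.length_cons]
        push_cast
        omega

-- ===== VERDICT (by name: the statement is the Claim_ definition above) =====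
theorem pos_prefix_token_spans_py_spec : Claim_equal_pos_prefix_token_spans_py := by
  intro prefix_mask _
  unfold Spec_pos_prefix_token_spans_py pos_prefix_token_spans_py pos_prefix_token_spans_py_alt
  set inner := PySem.List.slice prefix_mask (some 1) (some (-1)) with hinner
  clear_value inner
  show (let st := inner.foldl stepA ([], 1, [])
        if st.2.2.isEmpty then st.1 else st.1 ++ [st.2.2]) = _
  rw [aLoop_eq inner [] 1 []]
  cases inner with
  | nil => simp [gSpec]
  | cons m rest =>
      simp only [List.isEmpty_cons, Bool.false_eq_true, if_false, List.nil_append]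
      rw [enum_eq (m :: rest) 0, List.cons_append, List.tail_cons, zip_eq]
      simp only [gSpec, List.isEmpty_nil, Bool.not_true, Bool.and_false, Bool.false_eq_true,
        if_false, List.nil_append, idxsFrom]
      have h0 : (m && decide ((0:Int) < 0)) = false := by simp
      rw [h0]
      simp only [Bool.false_eq_true, if_false]
      have h1 : ([ (1:Int) ]) = PySem.List.pyRange (0 + 1) (1 + 1) 1 := by decide
      calc gSpec rest (1 + 1) [1] = gSpec rest (1 + 1) (PySem.List.pyRange (0 + 1) (1 + 1) 1) := by rw [← h1]
        _ = build 0 (idxsFrom 1 rest) (1 + rest.length) := main_lemma rest 1 0 (by omega) (by omega)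
        _ = build 0 (idxsFrom 1 rest) ((m :: rest).length : Int) := by
              congr 1; simp only [List.length_cons]; push_cast; omega
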